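-- pv_equiv track=rewrite | github.com/pyapyapya/Problem-Solving-TIL | 프로그래머스/lv2/17683. ［3차］ 방금그곡/［3차］ 방금그곡.py | search_music_title
-- ===== SOURCE A (Python) =====
-- from collections import deque
--
-- def search_music_title(query_melody, play_melody, play_time):
--     query_melody = list(query_melody)
--     len_query_melody = len(query_melody)
--     deq = deque([], maxlen=len_query_melody)
--     play_melody = play_melody * 1440
--     for minute in range(play_time+1):
--         deq.append(play_melody[minute])
--         if query_melody == list(deq):
--             return 1
--     return 0
-- ===== SOURCE B (Python) =====
-- def search_music_title(query_melody, play_melody, play_time):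
--     if play_time < 0:
--         return 0
--     s = (play_melody * 1440)[:play_time + 1]
--     return 1 if query_melody in s else 0
-- ===== Notes on version B (the rewrite author's own statement) =====
-- stated objective: faster
-- what changed: A slides a deque over the first play_time+1 characters of play_melody*1440, comparing the whole window list(deq) == query each minute; B builds that prefix once and does a single substring-containment test (Python's 'in', Crochemore-Perrin in CPython).
-- outside the precondition, e.g. on search_music_title('a', 'a', 2000): A returns 1, B returns 1
import Mathlib
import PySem

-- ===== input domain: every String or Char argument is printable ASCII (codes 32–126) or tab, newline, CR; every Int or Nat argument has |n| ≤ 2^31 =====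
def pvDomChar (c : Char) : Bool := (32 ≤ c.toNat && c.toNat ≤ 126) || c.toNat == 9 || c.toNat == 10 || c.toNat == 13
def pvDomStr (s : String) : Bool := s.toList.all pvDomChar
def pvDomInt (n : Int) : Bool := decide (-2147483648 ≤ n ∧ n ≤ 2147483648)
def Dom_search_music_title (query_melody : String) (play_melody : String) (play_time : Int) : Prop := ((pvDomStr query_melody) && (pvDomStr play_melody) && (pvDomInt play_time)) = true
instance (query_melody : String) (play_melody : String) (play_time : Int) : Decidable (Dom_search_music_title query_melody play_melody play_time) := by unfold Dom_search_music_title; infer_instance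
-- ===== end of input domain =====

-- B replaces A's minute-by-minute deque sliding window (a full list comparison per minute)
-- by one substring-containment test on the first play_time+1 characters; measurably faster.

-- ===== PORT A =====
-- deque(maxlen := k).append v : keep the last k elements of deq ++ [v]
def smtDeqAppend (k : Nat) (deq : List Char) (v : Char) : List Char :=
  ((deq ++ [v])).drop ((deq ++ [v]).length - k)

-- the 'for minute in range(play_time+1)' loop with its early 'return 1'
def smtLoopA (pm q : List Char) (k : Nat) : List Int → List Char → Int
  | [], _ => 0
  | m :: rest, deq =>
    -- play_melody[minute]: IndexError (pyGet? = none) is excluded by Pre_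
    let v := (PySem.List.pyGet? pm m).getD ' '
    let deq' := smtDeqAppend k deq v
    if deq' = q then 1 else smtLoopA pm q k rest deq'

def search_music_title (query_melody : String) (play_melody : String) (play_time : Int) : Int :=
  let q := query_melody.toList                                  -- list(query_melody)
  let len_query_melody := q.length
  let pm := List.flatten (List.replicate 1440 play_melody.toList)  -- play_melody * 1440
  smtLoopA pm q len_query_melody (PySem.List.pyRange 0 (play_time + 1) 1) []

-- ===== PORT B =====
def search_music_title_alt (query_melody : String) (play_melody : String) (play_time : Int) : Int :=
  if play_time < 0 then 0
  else
    -- (play_melody * 1440)[:play_time + 1]: the bound is ≥ 0 here, so the slice is a take (exact)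
    let s := (List.flatten (List.replicate 1440 play_melody.toList)).take (play_time + 1).toNat
    if PySem.Chars.isIn query_melody.toList s then 1 else 0      -- query_melody in s

-- ===== PRECONDITION & SPEC =====
-- Pre_ excludes play_time ≥ 1440·len(play_melody): there A's indexing into play_melody*1440
-- raises IndexError unless an earlier minute already matched (then A returns 1, as does B).
def Pre_search_music_title (query_melody : String) (play_melody : String) (play_time : Int) : Prop :=
  play_time < 1440 * (play_melody.toList.length : Int)
instance (query_melody : String) (play_melody : String) (play_time : Int) : Decidable (Pre_search_music_title query_melody play_melody play_time) := by unfold Pre_search_music_title; infer_instance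

def pvWitness_search_music_title : String × String × Int := ("CDE", "ABCDEFG", 20)

def Spec_search_music_title (query_melody : String) (play_melody : String) (play_time : Int) (out : Int) : Prop := out = search_music_title_alt query_melody play_melody play_time
instance (query_melody : String) (play_melody : String) (play_time : Int) (out : Int) : Decidable (Spec_search_music_title query_melody play_melody play_time out) := by unfold Spec_search_music_title; infer_instance

-- ===== CLAIM (what is proved, stated in full; the proofs are below) =====
def Claim_equal_search_music_title : Prop := ∀ (query_melody : String) (play_melody : String) (play_time : Int), Dom_search_music_title query_melody play_melody play_time → Pre_search_music_title query_melody play_melody play_time → Spec_search_music_title query_melody play_melody play_time (search_music_title query_melody play_melody play_time)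

-- ===== LEMMAS AND PROOFS =====

-- the last k elements of l (the deque's content after sliding over l)
def smtLastN (k : Nat) (l : List Char) : List Char := l.drop (l.length - k)

lemma smtDeqAppend_lastN (k : Nat) (l : List Char) (v : Char) :
    smtDeqAppend k (smtLastN k l) v = smtLastN k (l ++ [v]) := by
  unfold smtDeqAppend smtLastN
  by_cases h : l.length ≤ k
  · simp [Nat.sub_eq_zero_of_le h]
  · rw [Nat.not_le] at h
    have hlen : (l.drop (l.length - k)).length = k := by
      simp [Nat.sub_sub_self (Nat.le_of_lt h)]
    rw [List.drop_append, List.drop_append]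
    congr 1
    · rw [List.drop_drop]
      congr 1
      simp [hlen]
      omega
    · simp [hlen]
      omega

lemma smtLoopA_eq_any (pm q : List Char) :
    ∀ (n i : Nat), i + n ≤ pm.length →
    smtLoopA pm q q.length (PySem.List.pyRange i (i + (n : Int)) 1) (smtLastN q.length (pm.take i))
      = if (List.range' i n).any (fun m => decide (q <:+ pm.take (m + 1))) then 1 else 0 := by
  intro n
  induction n with
  | zero =>
    intro i _
    rw [show ((i : Int) + (0 : Nat)) = (i : Int) by push_cast; ring,
        PySem.List.pyRange_one_eq_nil (le_refl _)]
    simp [smtLoopA]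
  | succ n ih =>
    intro i hle
    have hib : (i : Int) < i + ((n + 1 : Nat) : Int) := by push_cast; omega
    rw [PySem.List.pyRange_one_cons hib]
    have hi : i < pm.length := by omega
    have hv : (PySem.List.pyGet? pm (i : Int)).getD ' ' = pm[i] := by
      rw [PySem.List.pyGet?_natCast]
      simp [hi]
    have htake : pm.take i ++ [pm[i]] = pm.take (i + 1) := by
      rw [List.take_add_one]
      simp [hi]
    have hrange : List.range' i (n + 1) = i :: List.range' (i + 1) n := List.range'_succ
    rw [hrange]
    simp only [smtLoopA, hv, List.any_cons]
    rw [smtDeqAppend_lastN, htake]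
    by_cases hm : smtLastN q.length (pm.take (i + 1)) = q
    · have : q <:+ pm.take (i + 1) := by
        rw [List.suffix_iff_eq_drop]; exact hm.symm
      simp [hm, this]
    · have : ¬ q <:+ pm.take (i + 1) := by
        rw [List.suffix_iff_eq_drop]; intro h; exact hm h.symm
      rw [if_neg hm]
      simp only [decide_eq_false this, Bool.false_or]
      have := ih (i + 1) (by omega)
      rw [show ((i : Int) + 1) = ((i + 1 : Nat) : Int) by push_cast; ring,
          show ((i : Int) + ((n + 1 : Nat) : Int)) = ((i + 1 : Nat) : Int) + (n : Int) by push_cast; ring]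
      exact this

-- any window-match in the first n characters ↔ substring containment in the prefix of length n
lemma smtAny_iff_isIn (pm q : List Char) (n : Nat) (hn : 1 ≤ n) :
    ((List.range' 0 n).any (fun m => decide (q <:+ pm.take (m + 1))) = true)
      ↔ PySem.Chars.isIn q (pm.take n) = true := by
  rw [PySem.Chars.isIn_iff_infix]
  constructor
  · intro h
    rcases List.any_eq_true.mp h with ⟨m, hm, hsuf⟩
    rcases List.mem_range'_1.mp hm with ⟨-, hmn⟩
    have hpre : pm.take (m + 1) <+: pm.take n := by
      rw [show pm.take (m + 1) = (pm.take n).take (m + 1) by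
        rw [List.take_take]; congr 1; omega]
      exact List.take_prefix _ _
    exact ((of_decide_eq_true hsuf).isInfix).trans hpre.isInfix
  · intro h
    rcases h with ⟨a, b, hab⟩
    by_cases hq : q = []
    · subst hq
      apply List.any_eq_true.mpr
      exact ⟨0, List.mem_range'_1.mpr ⟨le_refl _, by omega⟩, by simp⟩
    · have hqlen : 1 ≤ q.length := by
        cases q with
        | nil => exact absurd rfl hq
        | cons x xs => simp
      have hlen : a.length + q.length ≤ n := by
        have := congrArg List.length hab
        simp at this
        have hnle : (pm.take n).length ≤ n := by simp
        omega
      apply List.any_eq_true.mpr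
      refine ⟨a.length + q.length - 1, List.mem_range'_1.mpr ⟨by omega, by omega⟩, ?_⟩
      apply decide_eq_true
      have : pm.take (a.length + q.length - 1 + 1) = a ++ q := by
        have h1 : a.length + q.length - 1 + 1 = a.length + q.length := by omega
        rw [h1, show pm.take (a.length + q.length) = (pm.take n).take (a.length + q.length) by
          rw [List.take_take]; congr 1; omega, ← hab]
        rw [List.append_assoc, show a.length + q.length = (a ++ q).length by simp,
            ← List.append_assoc, List.take_left]
      rw [this]
      exact List.suffix_append a q

lemma smtPmLength (p : List Char) :
    (List.flatten (List.replicate 1440 p)).length = 1440 * p.length := by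
  simp only [List.length_flatten, List.map_replicate, List.sum_replicate, smul_eq_mul]

-- ===== VERDICT (by name: the statement is the Claim_ definition above) =====
theorem search_music_title_spec : Claim_equal_search_music_title := by
  intro query_melody play_melody play_time _ hpre
  unfold Spec_search_music_title search_music_title search_music_title_alt
  unfold Pre_search_music_title at hpre
  set q := query_melody.toList with hq
  set pm := List.flatten (List.replicate 1440 play_melody.toList) with hpm
  by_cases ht : play_time < 0
  · rw [if_pos ht, PySem.List.pyRange_one_eq_nil (by omega)]
    rfl
  · rw [if_neg ht]
    rw [Int.not_lt] at ht
    set n := (play_time + 1).toNat with hn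
    have hn1 : 1 ≤ n := by omega
    have hcast : play_time + 1 = (n : Int) := by omega
    have hnlen : n ≤ pm.length := by
      rw [hpm, smtPmLength]
      omega
    have h0 : PySem.List.pyRange 0 (play_time + 1) 1 = PySem.List.pyRange ((0 : Nat) : Int) (((0 : Nat) : Int) + (n : Int)) 1 := by
      rw [hcast]; norm_num
    rw [h0, show ([] : List Char) = smtLastN q.length (pm.take 0) by simp [smtLastN]]
    rw [smtLoopA_eq_any pm q n 0 (by omega)]
    by_cases hany : (List.range' 0 n).any (fun m => decide (q <:+ pm.take (m + 1))) = true
    · rw [if_pos hany, if_pos ((smtAny_iff_isIn pm q n hn1).mp hany)]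
    · rw [if_neg hany, if_neg (fun hc => hany ((smtAny_iff_isIn pm q n hn1).mpr hc))]
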